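-- pv_equiv track=rewrite | github.com/Uzy03/InternShip | subject3/src/layer4/feature_reduced_training/train_reduced_model.py | time_series_folds
-- ===== SOURCE A (Python) =====
-- def time_series_folds(years, min_train_years=20, test_window=1, last_n_tests=None):
--     """
--     expanding window: 最初の min_train_years を学習、その次の年を検証。
--     以降、テスト年を1つずつ進め、最大 last_n_tests 回。
--     （フルモデルと同じロジック）
--     """
--     ys = sorted(years)
--     folds = []
--     for i in range(min_train_years, len(ys)):
--         train_years = ys[:i]
--         test_years = ys[i:i+test_window]
--         folds.append((set(train_years), set(test_years)))
--         if last_n_tests is not None and len(folds) >= last_n_tests: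
--             break
--     return folds
-- ===== SOURCE B (Python) =====
-- def time_series_folds(years, min_train_years=20, test_window=1, last_n_tests=None):
--     # One forward pass over the sorted years with a running train set,
--     # emitting a fold before adding the current year to the train set.
--     ys = sorted(years)
--     train = set()
--     folds = []
--     for idx, y in enumerate(ys):
--         if idx >= min_train_years:
--             folds.append((set(train), set(ys[idx:idx + test_window])))
--             if last_n_tests is not None and len(folds) >= last_n_tests:
--                 return folds
--         train.add(y)
--     return folds
-- ===== Notes on version B (the rewrite author's own statement) =====
-- stated objective: alternative
-- what changed: Instead of indexing with range(min_train_years, len(ys)) and rebuilding each train set from a fresh prefix slice ys[:i], B makes a single enumerate pass over the sorted years maintaining a running train set incrementally (emit-before-add), returning early once last_n_tests folds are collected.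
-- outside the precondition, e.g. on time_series_folds([0, 1], -1, -1, 1): A returns [({0}, set())], B returns [(set(), {0})]
import Mathlib
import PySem

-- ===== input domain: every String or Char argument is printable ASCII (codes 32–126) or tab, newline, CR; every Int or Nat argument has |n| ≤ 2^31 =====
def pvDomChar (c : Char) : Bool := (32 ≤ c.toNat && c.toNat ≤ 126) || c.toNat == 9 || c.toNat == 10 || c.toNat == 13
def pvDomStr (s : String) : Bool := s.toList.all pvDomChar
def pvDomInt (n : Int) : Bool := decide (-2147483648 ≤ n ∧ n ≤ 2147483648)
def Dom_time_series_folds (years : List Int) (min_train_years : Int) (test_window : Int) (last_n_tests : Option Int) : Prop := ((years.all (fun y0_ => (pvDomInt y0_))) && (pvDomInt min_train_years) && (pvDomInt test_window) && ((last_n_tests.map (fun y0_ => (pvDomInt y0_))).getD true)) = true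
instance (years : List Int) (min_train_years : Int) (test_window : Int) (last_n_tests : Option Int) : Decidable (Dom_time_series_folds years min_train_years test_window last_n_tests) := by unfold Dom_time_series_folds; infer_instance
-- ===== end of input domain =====

-- B replaces A's range-indexed loop with a single enumerate pass over the sorted
-- years that maintains a running train set incrementally (emit-before-add):
-- a different decomposition, not claimed faster.

-- ===== PORT A =====
-- for i in range(min_train_years, len(ys)): append (set(ys[:i]), set(ys[i:i+test_window])); break on last_n_tests
def pvLoopA (ys : List Int) (test_window : Int) (last_n_tests : Option Int)
    (folds : List (List Int × List Int)) : List Int → List (List Int × List Int)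
  | [] => folds
  | i :: rest =>
    let train_years := PySem.List.slice ys none (some i)
    let test_years := PySem.List.slice ys (some i) (some (i + test_window))
    let folds' := folds ++ [(PySem.Set.ofList train_years, PySem.Set.ofList test_years)]
    if (match last_n_tests with | some n => ((folds'.length : Int) ≥ n : Bool) | none => false) then folds'
    else pvLoopA ys test_window last_n_tests folds' rest

def time_series_folds (years : List Int) (min_train_years : Int) (test_window : Int) (last_n_tests : Option Int) : List (List Int × List Int) :=
  let ys := PySem.List.sorted years (fun x => x) false
  pvLoopA ys test_window last_n_tests [] (PySem.List.pyRange min_train_years (ys.length : Int) 1)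

-- ===== PORT B =====
-- for idx, y in enumerate(ys): emit a fold while idx >= min_train_years (early return on
-- last_n_tests), then add y to the running train set.
def pvLoopB (ys : List Int) (min_train_years : Int) (test_window : Int) (last_n_tests : Option Int)
    : List Int → Nat → PySem.Set Int → List (List Int × List Int) → List (List Int × List Int)
  | [], _, _, folds => folds
  | y :: rest, idx, train, folds =>
    if (min_train_years ≤ (idx : Int) : Bool) then
      let folds' := folds ++ [(PySem.Set.ofList train, PySem.Set.ofList (PySem.List.slice ys (some (idx : Int)) (some ((idx : Int) + test_window))))]
      if (match last_n_tests with | some n => ((folds'.length : Int) ≥ n : Bool) | none => false) then folds'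
      else pvLoopB ys min_train_years test_window last_n_tests rest (idx + 1) (PySem.Set.add train y) folds'
    else pvLoopB ys min_train_years test_window last_n_tests rest (idx + 1) (PySem.Set.add train y) folds

def time_series_folds_alt (years : List Int) (min_train_years : Int) (test_window : Int) (last_n_tests : Option Int) : List (List Int × List Int) :=
  let ys := PySem.List.sorted years (fun x => x) false
  pvLoopB ys min_train_years test_window last_n_tests ys 0 PySem.Set.empty []

-- ===== PRECONDITION & SPEC =====
-- Pre_ restricts min_train_years (a count of training years) to its natural nonnegative
-- domain: for negative min_train_years A's range starts at a negative index and the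
-- prefix/window slices wrap around, which B does not reproduce.
def Pre_time_series_folds (years : List Int) (min_train_years : Int) (test_window : Int) (last_n_tests : Option Int) : Prop :=
  0 ≤ min_train_years
instance (years : List Int) (min_train_years : Int) (test_window : Int) (last_n_tests : Option Int) : Decidable (Pre_time_series_folds years min_train_years test_window last_n_tests) := by unfold Pre_time_series_folds; infer_instance

def pvWitness_time_series_folds : List Int × Int × Int × Option Int := ([2020, 2018, 2019, 2021], 2, 1, some 2)

def Spec_time_series_folds (years : List Int) (min_train_years : Int) (test_window : Int) (last_n_tests : Option Int) (out : List (List Int × List Int)) : Prop := out = time_series_folds_alt years min_train_years test_window last_n_tests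
instance (years : List Int) (min_train_years : Int) (test_window : Int) (last_n_tests : Option Int) (out : List (List Int × List Int)) : Decidable (Spec_time_series_folds years min_train_years test_window last_n_tests out) := by unfold Spec_time_series_folds; infer_instance

-- ===== CLAIM (what is proved, stated in full; the proofs are below) =====
def Claim_equal_time_series_folds : Prop := ∀ (years : List Int) (min_train_years : Int) (test_window : Int) (last_n_tests : Option Int), Dom_time_series_folds years min_train_years test_window last_n_tests → Pre_time_series_folds years min_train_years test_window last_n_tests → Spec_time_series_folds years min_train_years test_window last_n_tests (time_series_folds years min_train_years test_window last_n_tests)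

-- ===== LEMMAS AND PROOFS =====

-- fact specific to the two loops: adding ys[k] to set(ys[:k]) is set(ys[:k+1])
theorem pvSet_add_take (ys : List Int) (k : Nat) (y : Int) (hget : ys[k]? = some y) :
    PySem.Set.add (PySem.Set.ofList (ys.take k)) y = PySem.Set.ofList (ys.take (k + 1)) := by
  have htake : ys.take (k + 1) = ys.take k ++ [y] := by
    rw [List.take_add_one, hget]; rfl
  rw [htake, PySem.Set.ofList_append_singleton]

-- Once idx has reached min_train_years, B's pass with the running train set
-- computes exactly A's remaining range loop.
theorem pvLoopB_eq_pvLoopA (ys : List Int) (mty tw : Int) (lnt : Option Int) :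
    ∀ (rest : List Int) (k : Nat) (folds : List (List Int × List Int)),
      ys.drop k = rest → mty ≤ (k : Int) →
      pvLoopB ys mty tw lnt rest k (PySem.Set.ofList (ys.take k)) folds
        = pvLoopA ys tw lnt folds (PySem.List.pyRange (k : Int) (ys.length : Int) 1) := by
  intro rest
  induction rest with
  | nil =>
    intro k folds hdrop hk
    have hlen : ys.length ≤ k := by
      by_contra h
      have := List.drop_eq_nil_iff.mp hdrop
      omega
    rw [PySem.List.pyRange_one_eq_nil (by exact_mod_cast hlen)]
    rfl
  | cons y rest ih =>
    intro k folds hdrop hk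
    have hklt : k < ys.length := by
      by_contra h
      have : ys.drop k = [] := List.drop_eq_nil_iff.mpr (by omega)
      simp [this] at hdrop
    have hget : ys[k]? = some y := by
      have : (ys.drop k)[0]? = some y := by rw [hdrop]; rfl
      simpa using this
    have hdrop' : ys.drop (k + 1) = rest := by
      have : (ys.drop k).drop 1 = rest := by rw [hdrop]; rfl
      simpa [List.drop_drop] using this
    rw [PySem.List.pyRange_one_cons (by exact_mod_cast hklt)]
    rw [pvLoopB]
    conv_rhs => rw [pvLoopA.eq_def]
    simp only [PySem.Set.ofList_ofList, PySem.List.slice_to_natCast, decide_eq_true_eq,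
      if_pos hk]
    have hrec : ∀ F, pvLoopB ys mty tw lnt rest (k + 1) ((PySem.Set.ofList (ys.take k)).add y) F
        = pvLoopA ys tw lnt F (PySem.List.pyRange ((k : Int) + 1) (ys.length : Int) 1) := by
      intro F
      rw [pvSet_add_take ys k y hget]
      have := ih (k + 1) F hdrop' (by omega)
      simpa using this
    cases lnt with
    | none => exact hrec _
    | some n =>
      split_ifs with h
      · rfl
      · exact hrec _

-- Before idx reaches min_train_years, B only accumulates the train set; the
-- whole remaining run still equals A's loop over range(min_train_years, len ys).
theorem pvLoopB_prefix (ys : List Int) (mty tw : Int) (lnt : Option Int) :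
    ∀ (rest : List Int) (k : Nat) (folds : List (List Int × List Int)),
      ys.drop k = rest → (k : Int) ≤ mty →
      pvLoopB ys mty tw lnt rest k (PySem.Set.ofList (ys.take k)) folds
        = pvLoopA ys tw lnt folds (PySem.List.pyRange mty (ys.length : Int) 1) := by
  intro rest
  induction rest with
  | nil =>
    intro k folds hdrop hk
    have hlen : ys.length ≤ k := by
      by_contra h
      have := List.drop_eq_nil_iff.mp hdrop
      omega
    rw [PySem.List.pyRange_one_eq_nil (by omega)]
    rfl
  | cons y rest ih =>
    intro k folds hdrop hk
    by_cases hke : (k : Int) = mty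
    · rw [← hke]
      exact pvLoopB_eq_pvLoopA ys (k : Int) tw lnt (y :: rest) k folds hdrop (le_refl _)
    · have hklt : (k : Int) < mty := lt_of_le_of_ne hk hke
      have hget : ys[k]? = some y := by
        have : (ys.drop k)[0]? = some y := by rw [hdrop]; rfl
        simpa using this
      have hdrop' : ys.drop (k + 1) = rest := by
        have : (ys.drop k).drop 1 = rest := by rw [hdrop]; rfl
        simpa [List.drop_drop] using this
      rw [pvLoopB]
      simp only [decide_eq_true_eq, if_neg (by omega : ¬ mty ≤ (k : Int))]
      rw [pvSet_add_take ys k y hget]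
      have := ih (k + 1) folds hdrop' (by omega)
      simpa using this

-- ===== VERDICT (by name: the statement is the Claim_ definition above) =====
theorem time_series_folds_spec : Claim_equal_time_series_folds := by
  intro years mty tw lnt _hdom hpre
  unfold Spec_time_series_folds time_series_folds time_series_folds_alt
  have h := pvLoopB_prefix (PySem.List.sorted years (fun x => x) false) mty tw lnt
    (PySem.List.sorted years (fun x => x) false) 0 [] rfl (by exact_mod_cast hpre)
  simpa using h.symm
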